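-- pv_equiv track=rewrite | github.com/TRON-Bioinformatics/EasyFuse | bin/fusionannotation/src/result_handler.py | get_exon_ranges
-- ===== SOURCE A (Python) =====
-- def get_exon_ranges(exons: list, neo_pep_until_bp_nuc: int) -> list:
--     """_summary_
--
--     Args:
--         exons (list): _description_
--         neo_pep_until_bp_nuc (int): _description_
--
--     Returns:
--         list: _description_
--     """
--     exon_pos = 1
--     summed_len = 0
--     for exon_pos, exon_length in enumerate([y - x for x, y in exons], 1):
--         summed_len += exon_length
--         if neo_pep_until_bp_nuc <= summed_len:
--             break
--     lookup_exons = exons[:exon_pos]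
--     exon_starts = "|".join([str(x) for x, y in lookup_exons])
--     exon_ends = "|".join([str(y) for x, y in lookup_exons])
--     return (exon_starts, exon_ends)
-- ===== SOURCE B (Python) =====
-- def get_exon_ranges(exons: list, neo_pep_until_bp_nuc: int) -> list:
--     """Single recursive pass that subtracts each exon width from the remaining
--     nucleotide budget and builds the start/end string lists front-to-back,
--     instead of A's enumerate-accumulate loop followed by a slice and two
--     re-scans of the prefix."""
--     def go(rest, remaining):
--         if not rest:
--             return ([], [])
--         (x, y), tail = rest[0], rest[1:]
--         if remaining <= y - x or not tail:
--             return ([str(x)], [str(y)])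
--         s, e = go(tail, remaining - (y - x))
--         return ([str(x)] + s, [str(y)] + e)
--     starts, ends = go(exons, neo_pep_until_bp_nuc)
--     return ("|".join(starts), "|".join(ends))
-- ===== Notes on version B (the rewrite author's own statement) =====
-- stated objective: simpler
-- what changed: Replaces A's enumerate-and-accumulate loop plus slice plus two comprehension re-scans of the prefix with one recursive pass that subtracts each exon width from the remaining budget and emits both string lists as it goes.
import Mathlib
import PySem

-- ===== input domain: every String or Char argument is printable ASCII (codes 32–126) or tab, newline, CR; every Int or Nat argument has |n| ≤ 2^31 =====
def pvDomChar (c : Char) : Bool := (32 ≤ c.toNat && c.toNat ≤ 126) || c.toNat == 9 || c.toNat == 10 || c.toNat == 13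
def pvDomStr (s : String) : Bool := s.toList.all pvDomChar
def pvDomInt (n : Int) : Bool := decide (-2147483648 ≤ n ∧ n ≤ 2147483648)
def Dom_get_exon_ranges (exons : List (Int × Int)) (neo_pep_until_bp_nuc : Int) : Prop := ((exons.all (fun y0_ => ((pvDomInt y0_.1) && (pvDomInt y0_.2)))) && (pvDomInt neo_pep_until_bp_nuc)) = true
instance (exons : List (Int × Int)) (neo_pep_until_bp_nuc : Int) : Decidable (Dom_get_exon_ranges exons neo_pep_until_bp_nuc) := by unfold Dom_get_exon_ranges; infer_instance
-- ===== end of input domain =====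

-- B replaces A's enumerate-accumulate loop + slice + two prefix re-scans with one
-- recursive pass that subtracts widths from the remaining budget and builds both
-- string lists as it goes (objective: simpler, same O(n) cost).

-- ===== PORT A =====
-- the for-loop over enumerate([y - x for x, y in exons], 1) with break,
-- state (summed_len, exon_pos)
def pvLoopA (neo : Int) : List (Int × Int) → Int → Int → Int
  | [], _, exon_pos => exon_pos
  | (i, exon_length) :: rest, summed_len, _ =>
      let summed_len := summed_len + exon_length
      if neo ≤ summed_len then i else pvLoopA neo rest summed_len i

def get_exon_ranges (exons : List (Int × Int)) (neo_pep_until_bp_nuc : Int) : String × String :=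
  let exon_pos : Int := pvLoopA neo_pep_until_bp_nuc
      (PySem.List.enumerate (exons.map (fun p => p.2 - p.1)) 1) 0 1
  let lookup_exons := PySem.List.slice exons none (some exon_pos)  -- exons[:exon_pos]
  let exon_starts := PySem.Str.join "|" (lookup_exons.map (fun p => PySem.Int.toStr p.1))
  let exon_ends := PySem.Str.join "|" (lookup_exons.map (fun p => PySem.Int.toStr p.2))
  (exon_starts, exon_ends)

-- ===== PORT B =====
-- Source B's inner recursive helper `go`
def pvGoB : List (Int × Int) → Int → List String × List String
  | [], _ => ([], [])
  | (x, y) :: tail, remaining =>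
      if remaining ≤ y - x ∨ tail = [] then ([PySem.Int.toStr x], [PySem.Int.toStr y])
      else
        let p := pvGoB tail (remaining - (y - x))
        (PySem.Int.toStr x :: p.1, PySem.Int.toStr y :: p.2)

def get_exon_ranges_alt (exons : List (Int × Int)) (neo_pep_until_bp_nuc : Int) : String × String :=
  let p := pvGoB exons neo_pep_until_bp_nuc
  (PySem.Str.join "|" p.1, PySem.Str.join "|" p.2)

-- ===== PRECONDITION & SPEC =====
def Spec_get_exon_ranges (exons : List (Int × Int)) (neo_pep_until_bp_nuc : Int) (out : String × String) : Prop := out = get_exon_ranges_alt exons neo_pep_until_bp_nuc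
instance (exons : List (Int × Int)) (neo_pep_until_bp_nuc : Int) (out : String × String) : Decidable (Spec_get_exon_ranges exons neo_pep_until_bp_nuc out) := by unfold Spec_get_exon_ranges; infer_instance

-- ===== CLAIM (what is proved, stated in full; the proofs are below) =====
def Claim_equal_get_exon_ranges : Prop := ∀ (exons : List (Int × Int)) (neo_pep_until_bp_nuc : Int), Dom_get_exon_ranges exons neo_pep_until_bp_nuc → Spec_get_exon_ranges exons neo_pep_until_bp_nuc (get_exon_ranges exons neo_pep_until_bp_nuc)

-- ===== LEMMAS AND PROOFS =====

-- number of exons both versions keep: first prefix whose summed width reaches r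
def pvCut : List Int → Int → Nat
  | [], _ => 0
  | w :: ws, r => if r ≤ w then 1 else 1 + pvCut ws (r - w)

theorem pvLoopA_eq_cut : ∀ (l : List Int), l ≠ [] → ∀ (s summed r j : Int),
    pvLoopA r (PySem.List.enumerate l s) summed j
      = s - 1 + (pvCut l (r - summed) : Int) := by
  intro l
  induction l with
  | nil => intro h; exact absurd rfl h
  | cons w t ih =>
      intro _ s summed r j
      rw [PySem.List.enumerate_cons]
      show (if r ≤ summed + w then s
            else pvLoopA r (PySem.List.enumerate t (s + 1)) (summed + w) s)
          = s - 1 + ((if r - summed ≤ w then 1 else 1 + pvCut t (r - summed - w) : Nat) : Int)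
      by_cases h : r ≤ summed + w
      · rw [if_pos h, if_pos (by omega)]; omega
      · rw [if_neg h, if_neg (by omega)]
        cases t with
        | nil =>
            rw [PySem.List.enumerate_nil]
            show s = s - 1 + ((1 + pvCut [] (r - summed - w) : Nat) : Int)
            simp [pvCut]
        | cons w' t' =>
            rw [ih (by simp) (s + 1) (summed + w) r s]
            have : r - (summed + w) = r - summed - w := by omega
            rw [this]
            push_cast
            omega

theorem pvGoB_eq_take (l : List (Int × Int)) : ∀ (r : Int),
    pvGoB l r
      = ((l.take (pvCut (l.map (fun p => p.2 - p.1)) r)).map (fun p => PySem.Int.toStr p.1),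
         (l.take (pvCut (l.map (fun p => p.2 - p.1)) r)).map (fun p => PySem.Int.toStr p.2)) := by
  induction l with
  | nil => intro r; simp [pvGoB]
  | cons hd tl ih =>
      intro r
      obtain ⟨x, y⟩ := hd
      simp only [pvGoB, List.map_cons, pvCut]
      by_cases h : r ≤ y - x
      · rw [if_pos (Or.inl h), if_pos h]
        simp
      · by_cases ht : tl = []
        · subst ht
          rw [if_pos (Or.inr rfl), if_neg h]
          simp [pvCut]
        · rw [if_neg (by simp [h, ht]), if_neg h]
          rw [ih (r - (y - x))]
          rw [Nat.add_comm 1 (pvCut (tl.map (fun p => p.2 - p.1)) (r - (y - x)))]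
          simp [List.take_succ_cons]

theorem get_exon_ranges_eq (exons : List (Int × Int)) (neo : Int) :
    get_exon_ranges exons neo = get_exon_ranges_alt exons neo := by
  cases exons with
  | nil =>
      simp [get_exon_ranges, get_exon_ranges_alt, pvLoopA, pvGoB,
        PySem.List.enumerate_nil, PySem.List.slice]
  | cons hd tl =>
      unfold get_exon_ranges get_exon_ranges_alt
      rw [List.map_cons, pvLoopA_eq_cut ((hd.2 - hd.1) :: tl.map (fun p => p.2 - p.1))
            (by simp) 1 0 neo 1]
      rw [pvGoB_eq_take (hd :: tl) neo]
      have hcut : (1 : Int) - 1 + (pvCut ((hd.2 - hd.1) :: tl.map (fun p => p.2 - p.1)) (neo - 0) : Int)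
        = (pvCut ((hd.2 - hd.1) :: tl.map (fun p => p.2 - p.1)) neo : Int) := by
        norm_num
      rw [hcut]
      simp [PySem.List.slice_to _ (Int.natCast_nonneg _)]

-- ===== VERDICT (by name: the statement is the Claim_ definition above) =====
theorem get_exon_ranges_spec : Claim_equal_get_exon_ranges := by
  intro exons neo _
  unfold Spec_get_exon_ranges
  exact get_exon_ranges_eq exons neo
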